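-- pv_equiv track=rewrite | github.com/DT-UCPH/cuc | agent/pipeline/steps/verb_pronominal_suffix_tail.py | _split_tail_suffix
-- ===== SOURCE A (Python) =====
-- _STEM_MARKERS = (":pass", ":d", ":l", ":r")
--
-- _SUFFIX_SEGMENTS = ("nkm", "hm", "hn", "km", "kn", "ny", "nh", "nk", "nm", "nn", "h", "k", "n", "y")
--
-- def _split_tail_suffix(tail: str) -> tuple[str, str] | None:
--     for suffix in _SUFFIX_SEGMENTS:
--         if tail == suffix:
--             return suffix, ""
--         for marker in _STEM_MARKERS:
--             if tail == f"{suffix}{marker}":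
--                 return suffix, marker
--     return None
-- ===== SOURCE B (Python) =====
-- _STEM_MARKERS = (":pass", ":d", ":l", ":r")
--
-- _SUFFIX_SEGMENTS = ("nkm", "hm", "hn", "km", "kn", "ny", "nh", "nk", "nm", "nn", "h", "k", "n", "y")
--
-- _SUFFIX_SET = set(_SUFFIX_SEGMENTS)
--
--
-- def _split_tail_suffix(tail: str) -> tuple[str, str] | None:
--     idx = tail.find(":")
--     if idx == -1:
--         stem, marker = tail, ""
--     else:
--         stem, marker = tail[:idx], tail[idx:]
--     if marker and marker not in _STEM_MARKERS:
--         return None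
--     if stem in _SUFFIX_SET:
--         return (stem, marker)
--     return None
-- ===== Notes on version B (the rewrite author's own statement) =====
-- stated objective: simpler
-- what changed: Instead of enumerating all 70 suffix/marker concatenations in a nested loop, B splits the tail at its first colon into stem and marker, validates the marker against _STEM_MARKERS, and looks the stem up in a set of _SUFFIX_SEGMENTS.
import Mathlib
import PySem

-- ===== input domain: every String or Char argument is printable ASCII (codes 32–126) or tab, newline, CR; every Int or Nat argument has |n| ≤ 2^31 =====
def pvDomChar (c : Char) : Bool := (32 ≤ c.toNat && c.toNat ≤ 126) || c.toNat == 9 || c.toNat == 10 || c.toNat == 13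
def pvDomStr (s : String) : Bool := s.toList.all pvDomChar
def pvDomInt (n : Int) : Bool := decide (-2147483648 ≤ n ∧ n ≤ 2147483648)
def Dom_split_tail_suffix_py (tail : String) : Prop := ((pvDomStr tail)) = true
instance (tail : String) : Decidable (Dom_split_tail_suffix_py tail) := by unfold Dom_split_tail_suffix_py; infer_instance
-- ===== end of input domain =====

-- B replaces A's nested enumeration of every suffix×marker concatenation by a direct
-- parse: split the tail at its first colon, validate the marker, look the stem up in a set.

-- ===== PORT A =====
def pvStemMarkers : List String := [":pass", ":d", ":l", ":r"]

def pvSuffixSegments : List String :=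
  ["nkm", "hm", "hn", "km", "kn", "ny", "nh", "nk", "nm", "nn", "h", "k", "n", "y"]

-- inner 'for marker in _STEM_MARKERS' loop with its early return
def pvInnerA (tail suffix : String) : List String → Option (String × String)
  | [] => none
  | m :: ms => if tail = suffix ++ m then some (suffix, m) else pvInnerA tail suffix ms

-- outer 'for suffix in _SUFFIX_SEGMENTS' loop with its early returns
def pvOuterA (tail : String) : List String → Option (String × String)
  | [] => none
  | s :: ss =>
    if tail = s then some (s, "")
    else
      match pvInnerA tail s pvStemMarkers with
      | some r => some r
      | none => pvOuterA tail ss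

def split_tail_suffix_py (tail : String) : Option (String × String) :=
  pvOuterA tail pvSuffixSegments

-- ===== PORT B =====
-- hand port of `idx = tail.find(":")` plus the slices `tail[:idx]` / `tail[idx:]`:
-- splits a list at its FIRST ':' (exact: returns (tail, []) when there is no colon)
def pvSplitColon : List Char → List Char × List Char
  | [] => ([], [])
  | c :: cs => if c = ':' then ([], c :: cs) else ((pvSplitColon cs).1.cons c, (pvSplitColon cs).2)

def pvSuffixSet : PySem.Set String := PySem.Set.ofList pvSuffixSegments

def pvFinish (stem marker : String) : Option (String × String) :=
  if marker ≠ "" ∧ ¬ pvStemMarkers.contains marker then none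
  else if pvSuffixSet.contains stem then some (stem, marker)
  else none

def split_tail_suffix_py_alt (tail : String) : Option (String × String) :=
  pvFinish (String.ofList (pvSplitColon tail.toList).1)
    (String.ofList (pvSplitColon tail.toList).2)

-- ===== PRECONDITION & SPEC =====
def Spec_split_tail_suffix_py (tail : String) (out : Option (String × String)) : Prop := out = split_tail_suffix_py_alt tail
instance (tail : String) (out : Option (String × String)) : Decidable (Spec_split_tail_suffix_py tail out) := by unfold Spec_split_tail_suffix_py; infer_instance

-- ===== CLAIM (what is proved, stated in full; the proofs are below) =====
def Claim_equal_split_tail_suffix_py : Prop := ∀ (tail : String), Dom_split_tail_suffix_py tail → Spec_split_tail_suffix_py tail (split_tail_suffix_py tail)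

-- ===== LEMMAS AND PROOFS =====

theorem pvSplitColon_append (a b : List Char) (ha : ∀ c ∈ a, c ≠ ':')
    (hb : b = [] ∨ ∃ r, b = ':' :: r) : pvSplitColon (a ++ b) = (a, b) := by
  induction a with
  | nil =>
    rcases hb with rfl | ⟨r, rfl⟩
    · rfl
    · simp [pvSplitColon]
  | cons c cs ih =>
    have hc : c ≠ ':' := ha c (by simp)
    have ih' := ih (fun x hx => ha x (by simp [hx]))
    simp [pvSplitColon, hc, ih']

theorem pvSplitColon_join (l : List Char) :
    (pvSplitColon l).1 ++ (pvSplitColon l).2 = l := by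
  induction l with
  | nil => rfl
  | cons c cs ih =>
    by_cases hc : c = ':' <;> simp [pvSplitColon, hc, ih]

-- decomposition at the first colon is unique among colon-free stems and colon-led markers
theorem pvDecomp_iff (tail s m : String) (hs : ∀ c ∈ s.toList, c ≠ ':')
    (hm : m = "" ∨ ∃ r, m.toList = ':' :: r) :
    tail = s ++ m ↔
      (String.ofList (pvSplitColon tail.toList).1 = s ∧
       String.ofList (pvSplitColon tail.toList).2 = m) := by
  constructor
  · rintro rfl
    have hb : m.toList = [] ∨ ∃ r, m.toList = ':' :: r := by
      rcases hm with rfl | h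
      · left; rfl
      · right; exact h
    have := pvSplitColon_append s.toList m.toList hs hb
    simp [this]
  · rintro ⟨h1, h2⟩
    have hj := pvSplitColon_join tail.toList
    apply String.toList_inj.mp
    rw [String.toList_append, ← hj, ← h1, ← h2]
    simp

theorem pvMarker_ne_empty {m : String} (hm : m ∈ pvStemMarkers) : m ≠ "" := by
  simp [pvStemMarkers] at hm
  rcases hm with rfl | rfl | rfl | rfl <;> simp

theorem pvMarker_shape {m : String} (hm : m ∈ pvStemMarkers) : ∃ r, m.toList = ':' :: r := by
  simp [pvStemMarkers] at hm
  rcases hm with rfl | rfl | rfl | rfl <;> exact ⟨_, rfl⟩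

theorem pvSuffix_nocolon {s : String} (hs : s ∈ pvSuffixSegments) : ∀ c ∈ s.toList, c ≠ ':' := by
  simp [pvSuffixSegments] at hs
  rcases hs with rfl|rfl|rfl|rfl|rfl|rfl|rfl|rfl|rfl|rfl|rfl|rfl|rfl|rfl <;> simp

theorem pvInnerA_none (tail s : String) (ms : List String)
    (h : ∀ m ∈ ms, tail ≠ s ++ m) : pvInnerA tail s ms = none := by
  induction ms with
  | nil => rfl
  | cons m ms ih =>
    have := h m (by simp)
    simp [pvInnerA, this, ih (fun x hx => h x (by simp [hx]))]

theorem pvInnerA_some (tail s m : String) (ms : List String) (hm : m ∈ ms)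
    (h : tail = s ++ m) : pvInnerA tail s ms = some (s, m) := by
  induction ms with
  | nil => simp at hm
  | cons m' ms ih =>
    by_cases he : tail = s ++ m'
    · have : m' = m := by
        have : s ++ m' = s ++ m := he ▸ h
        have := String.toList_inj.mpr this
        simp [String.toList_append] at this
        exact String.toList_inj.mp this
      subst this
      simp [pvInnerA, he]
    · have hm' : m ∈ ms := by
        rcases List.mem_cons.mp hm with rfl | h'
        · exact absurd h he
        · exact h'
      simp [pvInnerA, he, ih hm']

theorem pvMain (tail : String) :
    split_tail_suffix_py_alt tail = pvOuterA tail pvSuffixSegments := by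
  unfold split_tail_suffix_py_alt
  generalize hstem : String.ofList (pvSplitColon tail.toList).1 = stem
  generalize hmarker : String.ofList (pvSplitColon tail.toList).2 = marker
  have key : ∀ s m : String, s ∈ pvSuffixSegments → (m = "" ∨ m ∈ pvStemMarkers) →
      (tail = s ++ m ↔ (stem = s ∧ marker = m)) := by
    intro s m hs hm
    have hsh : m = "" ∨ ∃ r, m.toList = ':' :: r := by
      rcases hm with rfl | h
      · exact Or.inl rfl
      · exact Or.inr (pvMarker_shape h)
    rw [← hstem, ← hmarker]
    exact pvDecomp_iff tail s m (pvSuffix_nocolon hs) hsh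
  by_cases hok : stem ∈ pvSuffixSegments ∧ (marker = "" ∨ marker ∈ pvStemMarkers)
  · obtain ⟨hstemIn, hmOk⟩ := hok
    have hB : pvFinish stem marker = some (stem, marker) := by
      unfold pvFinish
      have hcond : ¬ (marker ≠ "" ∧ ¬ pvStemMarkers.contains marker) := by
        rcases hmOk with h | h
        · simp [h]
        · intro hc
          exact hc.2 (List.contains_iff_mem.mpr h)
      have hmem : pvSuffixSet.contains stem = true :=
        List.contains_iff_mem.mpr (by simpa [pvSuffixSet, PySem.Set.mem_ofList] using hstemIn)
      rw [if_neg hcond, if_pos hmem]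
    rw [hB]
    have htail : tail = stem ++ marker := (key stem marker hstemIn hmOk).mpr ⟨rfl, rfl⟩
    have main : ∀ ss : List String, (∀ x ∈ ss, x ∈ pvSuffixSegments) → stem ∈ ss →
        pvOuterA tail ss = some (stem, marker) := by
      intro ss hsub hmem
      induction ss with
      | nil => simp at hmem
      | cons s' rest ih =>
        have hs'In : s' ∈ pvSuffixSegments := hsub s' (by simp)
        by_cases hse : s' = stem
        · rcases hmOk with hm0 | hmIn
          · have ht : tail = s' := by rw [htail, hm0, hse]; simp
            simp [pvOuterA, ht, hm0, hse]
          · have hne : tail ≠ s' := by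
              intro h
              have : tail = s' ++ "" := by simp [h]
              have := (key s' "" hs'In (Or.inl rfl)).mp this
              exact pvMarker_ne_empty hmIn this.2
            rw [pvOuterA, if_neg hne,
              pvInnerA_some tail s' marker pvStemMarkers hmIn (by rw [htail, hse]), hse]
        · have hne : tail ≠ s' := by
            intro h
            have : tail = s' ++ "" := by simp [h]
            exact hse ((key s' "" hs'In (Or.inl rfl)).mp this).1.symm
          have hinner : pvInnerA tail s' pvStemMarkers = none := by
            apply pvInnerA_none
            intro m hm h
            exact hse ((key s' m hs'In (Or.inr hm)).mp h).1.symm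
          have hmem' : stem ∈ rest := by
            rcases List.mem_cons.mp hmem with h | h
            · exact absurd h.symm hse
            · exact h
          rw [pvOuterA, if_neg hne, hinner, ih (fun x hx => hsub x (by simp [hx])) hmem']
    exact (main pvSuffixSegments (fun x hx => hx) hstemIn).symm
  · have hB : pvFinish stem marker = none := by
      unfold pvFinish
      by_cases h1 : marker ≠ "" ∧ ¬ pvStemMarkers.contains marker
      · rw [if_pos h1]
      · have hm' : marker = "" ∨ marker ∈ pvStemMarkers := by
          rcases not_and_or.mp h1 with h | h
          · exact Or.inl (not_not.mp h)
          · exact Or.inr (List.contains_iff_mem.mp (not_not.mp h))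
        have hno : stem ∉ pvSuffixSegments := fun h => hok ⟨h, hm'⟩
        have hmem : ¬ (pvSuffixSet.contains stem = true) := fun hc =>
          hno (by simpa [pvSuffixSet, PySem.Set.mem_ofList] using List.contains_iff_mem.mp hc)
        rw [if_neg h1, if_neg hmem]
    rw [hB]
    have main : ∀ ss : List String, (∀ x ∈ ss, x ∈ pvSuffixSegments) →
        pvOuterA tail ss = none := by
      intro ss hsub
      induction ss with
      | nil => rfl
      | cons s' rest ih =>
        have hs'In : s' ∈ pvSuffixSegments := hsub s' (by simp)
        have hne : tail ≠ s' := by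
          intro h
          have : tail = s' ++ "" := by simp [h]
          have := (key s' "" hs'In (Or.inl rfl)).mp this
          exact hok ⟨this.1 ▸ hs'In, Or.inl this.2⟩
        have hinner : pvInnerA tail s' pvStemMarkers = none := by
          apply pvInnerA_none
          intro m hm h
          have := (key s' m hs'In (Or.inr hm)).mp h
          exact hok ⟨this.1 ▸ hs'In, Or.inr (this.2 ▸ hm)⟩
        rw [pvOuterA, if_neg hne, hinner, ih (fun x hx => hsub x (by simp [hx]))]
    exact (main pvSuffixSegments (fun x hx => hx)).symm

-- ===== VERDICT (by name: the statement is the Claim_ definition above) =====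
theorem split_tail_suffix_py_spec : Claim_equal_split_tail_suffix_py := by
  intro tail _
  unfold Spec_split_tail_suffix_py split_tail_suffix_py
  exact (pvMain tail).symm
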